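-- pv_equiv track=rewrite | github.com/TheAuditorTool/Auditor | theauditor/rules/frameworks/flask_analyzer.py | _find_unsafe_file_uploads
-- ===== SOURCE A (Python) =====
-- from typing import Any, Dict, List
--
-- def _find_unsafe_file_uploads(content: str) -> List[int]:
--     """Find unsafe file upload operations."""
--     findings = []
--     lines = content.split('\n')
--
--     for i, line in enumerate(lines, 1):
--         if 'request.files' in line and '.save(' in line:
--             # Check if there's validation nearby
--             context_start = max(0, i - 5)
--             context_end = min(len(lines), i + 5)
--             context = '\n'.join(lines[context_start:context_end])
--
--             if not any(check in context for check in ['allowed_file', 'secure_filename', 'validate']):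
--                 findings.append(i)
--
--     return findings
-- ===== SOURCE B (Python) =====
-- from typing import List
--
-- def _find_unsafe_file_uploads(content: str) -> List[int]:
--     """Find unsafe file upload operations (one pass building a validation-line
--     index, then window membership tests instead of rebuilding a context string)."""
--     lines = content.split('\n')
--     validated = set()
--     candidates = []
--     for i, line in enumerate(lines, 1):
--         if 'allowed_file' in line or 'secure_filename' in line or 'validate' in line:
--             validated.add(i)
--         if 'request.files' in line and '.save(' in line:
--             candidates.append(i)
--     return [i for i in candidates
--             if not any(j in validated for j in range(i - 4, i + 6))]
-- ===== Notes on version B (the rewrite author's own statement) =====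
-- stated objective: alternative
-- what changed: Instead of rebuilding a joined 10-line context string around each upload line and substring-searching it for validation markers, B makes one pass collecting the set of validation-line numbers and the upload candidates, then reports a candidate i iff no line number in range(i-4, i+6) is in that set.
import Mathlib
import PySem

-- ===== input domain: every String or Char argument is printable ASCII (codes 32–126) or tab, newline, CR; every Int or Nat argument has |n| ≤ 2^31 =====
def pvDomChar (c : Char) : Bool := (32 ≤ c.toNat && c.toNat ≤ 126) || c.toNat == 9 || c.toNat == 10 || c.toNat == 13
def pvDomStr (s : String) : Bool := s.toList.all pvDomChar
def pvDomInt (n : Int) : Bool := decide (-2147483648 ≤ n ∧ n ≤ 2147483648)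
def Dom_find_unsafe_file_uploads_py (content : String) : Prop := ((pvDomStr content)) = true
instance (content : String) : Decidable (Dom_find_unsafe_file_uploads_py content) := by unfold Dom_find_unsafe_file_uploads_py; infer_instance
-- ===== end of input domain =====

-- B re-implements A with a one-pass index of validation-line positions plus window
-- membership tests, instead of rebuilding and re-searching a joined context string per hit
-- (objective: alternative decomposition; same observable return value).

-- ===== PORT A =====
def find_unsafe_file_uploads_py (content : String) : List Int :=
  let lines := (PySem.Str.split? content "\n").getD []
  (PySem.List.enumerate lines 1).foldl (fun findings p =>
    if PySem.Str.isIn "request.files" p.2 && PySem.Str.isIn ".save(" p.2 then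
      let context_start := max 0 (p.1 - 5)
      let context_end := min (lines.length : Int) (p.1 + 5)
      let context := PySem.Str.join "\n" (PySem.List.slice lines (some context_start) (some context_end))
      if !(["allowed_file", "secure_filename", "validate"].any (fun check => PySem.Str.isIn check context)) then
        findings ++ [p.1]
      else findings
    else findings) []

-- ===== PORT B =====
def find_unsafe_file_uploads_py_alt (content : String) : List Int :=
  let lines := (PySem.Str.split? content "\n").getD []
  let r := (PySem.List.enumerate lines 1).foldl (fun s p =>
      (if PySem.Str.isIn "allowed_file" p.2 || PySem.Str.isIn "secure_filename" p.2 || PySem.Str.isIn "validate" p.2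
         then PySem.Set.add s.1 p.1 else s.1,
       if PySem.Str.isIn "request.files" p.2 && PySem.Str.isIn ".save(" p.2 then s.2 ++ [p.1] else s.2))
      ((PySem.Set.empty : PySem.Set Int), ([] : List Int))
  r.2.filter (fun i => !((PySem.List.pyRange (i - 4) (i + 6) 1).any (fun j => PySem.Set.contains r.1 j)))

-- ===== PRECONDITION & SPEC =====
def Spec_find_unsafe_file_uploads_py (content : String) (out : List Int) : Prop := out = find_unsafe_file_uploads_py_alt content
instance (content : String) (out : List Int) : Decidable (Spec_find_unsafe_file_uploads_py content out) := by unfold Spec_find_unsafe_file_uploads_py; infer_instance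

-- ===== CLAIM (what is proved, stated in full; the proofs are below) =====
def Claim_equal_find_unsafe_file_uploads_py : Prop := ∀ (content : String), Dom_find_unsafe_file_uploads_py content → Spec_find_unsafe_file_uploads_py content (find_unsafe_file_uploads_py content)

-- ===== LEMMAS AND PROOFS =====

lemma pv_prefix_split {α : Type} {sub u t : List α} {c : α} (hc : c ∉ sub)
    (h : sub <+: u ++ c :: t) : sub <+: u := by
  have h2 : u ++ [c] <+: u ++ c :: t := ⟨t, by simp⟩
  rcases List.prefix_or_prefix_of_prefix h h2 with h3 | h3
  · have h4 : u <+: u ++ [c] := ⟨[c], rfl⟩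
    rcases List.prefix_or_prefix_of_prefix h3 h4 with h5 | h5
    · exact h5
    · obtain ⟨v, rfl⟩ := h5
      have h6 : v <+: [c] := (List.prefix_append_right_inj u).mp h3
      cases v with
      | nil => simp
      | cons a v' =>
        obtain ⟨rfl, -⟩ := List.cons_prefix_cons.mp h6
        exact absurd (by simp : a ∈ u ++ a :: v') hc
  · exact absurd (h3.subset (by simp)) hc

lemma pv_drop_far {α : Type} (p J : List α) (c : α) (m : Nat) :
    (p ++ c :: J).drop (p.length + 1 + m) = J.drop m := by
  rw [List.drop_append, List.drop_eq_nil_of_le (by omega), List.nil_append]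
  have h : p.length + 1 + m - p.length = m + 1 := by omega
  rw [h, List.drop_succ_cons]

lemma pv_isIn_append_cons {sub p J : List Char} {c : Char} (hc : c ∉ sub) :
    PySem.Chars.isIn sub (p ++ c :: J) = (PySem.Chars.isIn sub p || PySem.Chars.isIn sub J) := by
  apply Bool.coe_iff_coe.mp
  simp only [Bool.or_eq_true]
  constructor
  · intro h
    obtain ⟨j, hj⟩ := (PySem.Chars.exists_prefix_drop_iff_isIn sub _).mpr h
    by_cases hjp : j ≤ p.length
    · rw [List.drop_append_of_le_length hjp] at hj
      exact Or.inl ((PySem.Chars.exists_prefix_drop_iff_isIn sub p).mp ⟨j, pv_prefix_split hc hj⟩)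
    · obtain ⟨m, rfl⟩ : ∃ m, j = p.length + 1 + m := ⟨j - p.length - 1, by omega⟩
      rw [pv_drop_far] at hj
      exact Or.inr ((PySem.Chars.exists_prefix_drop_iff_isIn sub J).mp ⟨_, hj⟩)
  · rintro (h | h)
    · obtain ⟨j, hj⟩ := (PySem.Chars.exists_prefix_drop_iff_isIn sub p).mpr h
      apply (PySem.Chars.exists_prefix_drop_iff_isIn sub _).mp
      by_cases hjp : j ≤ p.length
      · exact ⟨j, by rw [List.drop_append_of_le_length hjp]; exact hj.trans ⟨c :: J, rfl⟩⟩
      · have hsub : sub = [] := List.prefix_nil.mp (by rwa [List.drop_eq_nil_of_le (by omega)] at hj)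
        exact ⟨0, by simp [hsub]⟩
    · obtain ⟨j, hj⟩ := (PySem.Chars.exists_prefix_drop_iff_isIn sub J).mpr h
      exact (PySem.Chars.exists_prefix_drop_iff_isIn sub _).mp
        ⟨p.length + 1 + j, by rw [pv_drop_far]; exact hj⟩

lemma pv_isIn_join {sub : List Char} {c : Char} (hne : sub ≠ []) (hc : c ∉ sub) :
    ∀ parts : List (List Char),
      PySem.Chars.isIn sub (PySem.Chars.join [c] parts) = parts.any (fun p => PySem.Chars.isIn sub p) := by
  intro parts
  induction parts with
  | nil =>
    rw [PySem.Chars.join_nil]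
    simp only [List.any_nil]
    cases h : PySem.Chars.isIn sub [] with
    | false => rfl
    | true => exact absurd (List.infix_nil.mp ((PySem.Chars.isIn_iff_infix _ _).mp h)) hne
  | cons p ps ih =>
    cases ps with
    | nil => simp [PySem.Chars.join_singleton]
    | cons q rs =>
      rw [PySem.Chars.join_cons_cons, List.append_assoc, List.singleton_append,
        pv_isIn_append_cons hc, ih]
      simp

-- helpers naming predicates
def pvChk (line : String) : Bool :=
  PySem.Str.isIn "allowed_file" line || PySem.Str.isIn "secure_filename" line || PySem.Str.isIn "validate" line
def pvVal (lines : List String) : PySem.Set Int :=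
  PySem.Set.ofList (((PySem.List.enumerate lines 1).filter (fun p => pvChk p.2)).map (·.1))

lemma pv_mem_take_drop {α : Type} (l : List α) (a n : Nat) (x : α) :
    x ∈ (l.drop a).take n ↔ ∃ m, ∃ _h : m < l.length, a ≤ m ∧ m < a + n ∧ l[m] = x := by
  rw [List.mem_iff_getElem]
  constructor
  · rintro ⟨i, hi, rfl⟩
    have hi' : i < n ∧ a + i < l.length := by
      simp only [List.length_take, List.length_drop] at hi; omega
    refine ⟨a + i, hi'.2, by omega, by omega, ?_⟩
    rw [List.getElem_take, List.getElem_drop]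
  · rintro ⟨m, h, h1, h2, rfl⟩
    refine ⟨m - a, by simp only [List.length_take, List.length_drop]; omega, ?_⟩
    rw [List.getElem_take, List.getElem_drop]
    congr 1
    omega

lemma pv_chk_join (S : List String) :
    (["allowed_file", "secure_filename", "validate"].any fun check =>
      PySem.Str.isIn check (PySem.Str.join "\n" S)) = S.any pvChk := by
  have hsep : ("\n" : String).toList = ['\n'] := by decide
  simp only [List.any_cons, List.any_nil, PySem.Str.isIn_eq, PySem.Str.toList_join, hsep]
  rw [pv_isIn_join (by decide) (by decide), pv_isIn_join (by decide) (by decide),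
      pv_isIn_join (by decide) (by decide)]
  simp only [List.any_map]
  apply Bool.coe_iff_coe.mp
  simp only [Bool.or_eq_true, Bool.false_eq_true, or_false, List.any_eq_true, pvChk, PySem.Str.isIn_eq, Function.comp]
  constructor
  · rintro (⟨x, hx, h⟩ | ⟨x, hx, h⟩ | ⟨x, hx, h⟩)
    · exact ⟨x, hx, Or.inl (Or.inl h)⟩
    · exact ⟨x, hx, Or.inl (Or.inr h)⟩
    · exact ⟨x, hx, Or.inr h⟩
  · rintro ⟨x, hx, (h | h) | h⟩
    · exact Or.inl ⟨x, hx, h⟩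
    · exact Or.inr (Or.inl ⟨x, hx, h⟩)
    · exact Or.inr (Or.inr ⟨x, hx, h⟩)

lemma pv_window (lines : List String) (k : Nat) (hk : k < lines.length) :
    (["allowed_file", "secure_filename", "validate"].any fun check =>
      PySem.Str.isIn check (PySem.Str.join "\n"
        (PySem.List.slice lines (some (max 0 (1 + (k:Int) - 5))) (some (min (lines.length:Int) (1 + (k:Int) + 5)))))) =
    ((PySem.List.pyRange (1 + (k:Int) - 4) (1 + (k:Int) + 6) 1).any fun j =>
      PySem.Set.contains (pvVal lines) j) := by
  have ha : max 0 (1 + (k:Int) - 5) = ((k - 4 : Nat) : Int) := by omega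
  have hb : min (lines.length:Int) (1 + (k:Int) + 5) = ((min lines.length (k + 6) : Nat) : Int) := by omega
  rw [ha, hb, PySem.List.slice_natCast, pv_chk_join]
  apply Bool.coe_iff_coe.mp
  simp only [List.any_eq_true]
  constructor
  · rintro ⟨line, hmem, hchk⟩
    rw [pv_mem_take_drop] at hmem
    obtain ⟨m, hm, h1, h2, rfl⟩ := hmem
    refine ⟨1 + (m:Int), PySem.List.mem_pyRange_one.mpr (by omega), ?_⟩
    rw [PySem.Set.contains_iff, pvVal, PySem.Set.mem_ofList]
    simp only [List.mem_map, List.mem_filter, PySem.List.mem_enumerate_iff]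
    exact ⟨(1 + (m:Int), lines[m]), ⟨⟨m, hm, rfl⟩, hchk⟩, rfl⟩
  · rintro ⟨j, hj, hcon⟩
    rw [PySem.List.mem_pyRange_one] at hj
    rw [PySem.Set.contains_iff, pvVal, PySem.Set.mem_ofList] at hcon
    simp only [List.mem_map, List.mem_filter, PySem.List.mem_enumerate_iff] at hcon
    obtain ⟨q, ⟨⟨m, hm, hq⟩, hchk⟩, hfst⟩ := hcon
    subst hq
    simp only at hfst
    refine ⟨lines[m], ?_, hchk⟩
    rw [pv_mem_take_drop]
    exact ⟨m, hm, by omega, by omega, rfl⟩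

lemma pv_main (lines : List String) :
    (PySem.List.enumerate lines 1).foldl (fun findings p =>
      if PySem.Str.isIn "request.files" p.2 && PySem.Str.isIn ".save(" p.2 then
        if !(["allowed_file", "secure_filename", "validate"].any fun check =>
            PySem.Str.isIn check (PySem.Str.join "\n"
              (PySem.List.slice lines (some (max 0 (p.1 - 5))) (some (min (lines.length : Int) (p.1 + 5)))))) then
          findings ++ [p.1]
        else findings
      else findings) [] =
    (let r := (PySem.List.enumerate lines 1).foldl (fun s p =>
        (if PySem.Str.isIn "allowed_file" p.2 || PySem.Str.isIn "secure_filename" p.2 || PySem.Str.isIn "validate" p.2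
          then PySem.Set.add s.1 p.1 else s.1,
        if PySem.Str.isIn "request.files" p.2 && PySem.Str.isIn ".save(" p.2 then s.2 ++ [p.1] else s.2))
        ((PySem.Set.empty : PySem.Set Int), ([] : List Int));
      r.2.filter (fun i => !((PySem.List.pyRange (i - 4) (i + 6) 1).any (fun j => PySem.Set.contains r.1 j)))) := by
  rw [PySem.List.foldl_prod_mk
      (f := fun s (p : Int × String) => if PySem.Str.isIn "allowed_file" p.2 || PySem.Str.isIn "secure_filename" p.2 || PySem.Str.isIn "validate" p.2 then PySem.Set.add s p.1 else s)
      (g := fun s (p : Int × String) => if PySem.Str.isIn "request.files" p.2 && PySem.Str.isIn ".save(" p.2 then s ++ [p.1] else s)]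
  simp only []
  rw [PySem.List.foldl_if_eq_foldl_filter
      (p := fun p : Int × String => PySem.Str.isIn "allowed_file" p.2 || PySem.Str.isIn "secure_filename" p.2 || PySem.Str.isIn "validate" p.2)
      (f := fun s (p : Int × String) => PySem.Set.add s p.1)]
  rw [← List.foldl_map (f := fun (x : Int × String) => x.1) (g := PySem.Set.add)]
  rw [show (PySem.Set.empty : PySem.Set Int) = [] from rfl, ← PySem.Set.ofList_eq_foldl]
  rw [PySem.List.foldl_append_if
      (p := fun p : Int × String => PySem.Str.isIn "request.files" p.2 && PySem.Str.isIn ".save(" p.2)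
      (f := fun p : Int × String => p.1)]
  have hA : List.foldl
      (fun findings (p : Int × String) =>
        if (PySem.Str.isIn "request.files" p.2 && PySem.Str.isIn ".save(" p.2) = true then
          if (!(["allowed_file", "secure_filename", "validate"].any fun check =>
              PySem.Str.isIn check (PySem.Str.join "\n"
                (PySem.List.slice lines (some (max 0 (p.1 - 5))) (some (min (↑lines.length) (p.1 + 5))))))) = true then
            findings ++ [p.1]
          else findings
        else findings) [] (PySem.List.enumerate lines 1) =
      List.foldl (fun findings (p : Int × String) =>
        if ((PySem.Str.isIn "request.files" p.2 && PySem.Str.isIn ".save(" p.2) &&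
            !(["allowed_file", "secure_filename", "validate"].any fun check =>
              PySem.Str.isIn check (PySem.Str.join "\n"
                (PySem.List.slice lines (some (max 0 (p.1 - 5))) (some (min (↑lines.length) (p.1 + 5))))))) = true then
          findings ++ [p.1]
        else findings) [] (PySem.List.enumerate lines 1) := by
    apply PySem.List.foldl_congr_mem
    intro acc p _
    cases h1 : (PySem.Str.isIn "request.files" p.2 && PySem.Str.isIn ".save(" p.2) <;>
      simp only [Bool.true_and, Bool.false_and, Bool.false_eq_true, if_false, if_true]
  rw [hA]
  rw [PySem.List.foldl_append_if
      (p := fun p : Int × String => (PySem.Str.isIn "request.files" p.2 && PySem.Str.isIn ".save(" p.2) &&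
        !(["allowed_file", "secure_filename", "validate"].any fun check =>
          PySem.Str.isIn check (PySem.Str.join "\n"
            (PySem.List.slice lines (some (max 0 (p.1 - 5))) (some (min (↑lines.length) (p.1 + 5)))))))
      (f := fun p : Int × String => p.1)]
  simp only [List.nil_append]
  rw [List.filter_map, List.filter_filter]
  congr 1
  apply List.filter_congr
  intro p hp
  obtain ⟨k, hk, rfl⟩ := (PySem.List.mem_enumerate_iff _ _ _).mp hp
  simp only []
  rw [pv_window lines k hk]
  simp only [pvVal, pvChk]
  exact Bool.and_comm _ _

-- ===== VERDICT (by name: the statement is the Claim_ definition above) =====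
theorem find_unsafe_file_uploads_py_spec : Claim_equal_find_unsafe_file_uploads_py := by
  intro content _
  unfold Spec_find_unsafe_file_uploads_py
  simp only [find_unsafe_file_uploads_py, find_unsafe_file_uploads_py_alt]
  generalize (PySem.Str.split? content "\n").getD [] = lines
  exact pv_main lines
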